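-- pv_equiv track=rewrite | github.com/jiesutd/AnnTool | YEDDA.py | outputWithTagScheme
-- ===== SOURCE A (Python) =====
-- def outputWithTagScheme(input_list, label, tagScheme="BMES"):
--     output_list = []
--     list_length = len(input_list)
--     if tagScheme == "BMES":
--         if list_length == 1:
--             pair = input_list[0] + ' ' + 'S-' + label + '\n'
--             output_list.append(pair)
--         else:
--             for idx in range(list_length):
--                 if idx == 0:
--                     pair = input_list[idx] + ' ' + 'B-' + label + '\n'
--                 elif idx == list_length - 1:
--                     pair = input_list[idx] + ' ' + 'E-' + label + '\n'
--                 else: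
--                     pair = input_list[idx] + ' ' + 'M-' + label + '\n'
--                 output_list.append(pair)
--     else:
--         for idx in range(list_length):
--             if idx == 0:
--                 pair = input_list[idx] + ' ' + 'B-' + label + '\n'
--             else:
--                 pair = input_list[idx] + ' ' + 'I-' + label + '\n'
--             output_list.append(pair)
--     return output_list
-- ===== SOURCE B (Python) =====
-- def outputWithTagScheme(input_list, label, tagScheme="BMES"):
--     n = len(input_list)
--     if tagScheme == "BMES":
--         prefixes = [] if n == 0 else (['S'] if n == 1 else ['B'] + ['M'] * (n - 2) + ['E'])
--     else:
--         prefixes = [] if n == 0 else ['B'] + ['I'] * (n - 1)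
--     return [tok + ' ' + p + '-' + label + '\n' for tok, p in zip(input_list, prefixes)]
-- ===== Notes on version B (the rewrite author's own statement) =====
-- stated objective: simpler
-- what changed: Builds the whole prefix sequence up front in closed form (['B']+['M']*(n-2)+['E'] resp. ['B']+['I']*(n-1)) and emits the output in one uniform zip comprehension, instead of branching on the index inside the output loop.
import Mathlib
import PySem

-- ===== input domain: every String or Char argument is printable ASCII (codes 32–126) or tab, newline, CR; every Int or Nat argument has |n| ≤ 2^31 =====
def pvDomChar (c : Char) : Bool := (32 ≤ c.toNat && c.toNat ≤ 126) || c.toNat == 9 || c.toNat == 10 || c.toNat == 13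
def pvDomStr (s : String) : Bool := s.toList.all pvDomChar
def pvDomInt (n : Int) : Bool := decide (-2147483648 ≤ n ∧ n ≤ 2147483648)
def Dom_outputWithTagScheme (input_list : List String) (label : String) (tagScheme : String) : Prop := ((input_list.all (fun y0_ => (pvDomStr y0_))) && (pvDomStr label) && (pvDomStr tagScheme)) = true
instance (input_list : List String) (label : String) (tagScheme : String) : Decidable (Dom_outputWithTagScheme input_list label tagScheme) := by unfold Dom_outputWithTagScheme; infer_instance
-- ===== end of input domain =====

-- B builds the BMES/BIO prefix sequence up front in closed form and emits the output in one
-- uniform zip pass, instead of branching on the index inside the output loop (simpler decomposition).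

-- ===== PORT A =====
def outputWithTagScheme (input_list : List String) (label : String) (tagScheme : String) : List String :=
  let list_length : Int := input_list.length
  if tagScheme == "BMES" then
    if list_length == 1 then
      [PySem.List.pyGetD input_list 0 "" ++ " " ++ "S-" ++ label ++ "\n"]
    else
      (PySem.List.pyRange 0 list_length 1).foldl (fun output_list idx =>
        output_list ++
          [if idx == 0 then
             PySem.List.pyGetD input_list idx "" ++ " " ++ "B-" ++ label ++ "\n"
           else if idx == list_length - 1 then
             PySem.List.pyGetD input_list idx "" ++ " " ++ "E-" ++ label ++ "\n"
           else
             PySem.List.pyGetD input_list idx "" ++ " " ++ "M-" ++ label ++ "\n"]) []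
  else
    (PySem.List.pyRange 0 list_length 1).foldl (fun output_list idx =>
      output_list ++
        [if idx == 0 then
           PySem.List.pyGetD input_list idx "" ++ " " ++ "B-" ++ label ++ "\n"
         else
           PySem.List.pyGetD input_list idx "" ++ " " ++ "I-" ++ label ++ "\n"]) []

-- ===== PORT B =====
def outputWithTagScheme_alt (input_list : List String) (label : String) (tagScheme : String) : List String :=
  let n := input_list.length
  let prefixes : List String :=
    if tagScheme == "BMES" then
      if n == 0 then [] else if n == 1 then ["S"] else ["B"] ++ List.replicate (n - 2) "M" ++ ["E"]
    else
      if n == 0 then [] else ["B"] ++ List.replicate (n - 1) "I"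
  (input_list.zip prefixes).map (fun tp => tp.1 ++ " " ++ tp.2 ++ "-" ++ label ++ "\n")

-- ===== PRECONDITION & SPEC =====
def Spec_outputWithTagScheme (input_list : List String) (label : String) (tagScheme : String) (out : List String) : Prop := out = outputWithTagScheme_alt input_list label tagScheme
instance (input_list : List String) (label : String) (tagScheme : String) (out : List String) : Decidable (Spec_outputWithTagScheme input_list label tagScheme out) := by unfold Spec_outputWithTagScheme; infer_instance

-- ===== CLAIM (what is proved, stated in full; the proofs are below) =====
def Claim_equal_outputWithTagScheme : Prop := ∀ (input_list : List String) (label : String) (tagScheme : String), Dom_outputWithTagScheme input_list label tagScheme → Spec_outputWithTagScheme input_list label tagScheme (outputWithTagScheme input_list label tagScheme)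

-- ===== LEMMAS AND PROOFS =====


-- prefix sequence lookup for the BMES case (length ≥ 2)
lemma pv_bmes_pref_len (n : Nat) (h2 : 2 ≤ n) :
    (["B"] ++ List.replicate (n - 2) "M" ++ ["E"]).length = n := by
  simp; omega

lemma pv_bmes_pref_get (n k : Nat) (h2 : 2 ≤ n) (hk : k < n) :
    (["B"] ++ List.replicate (n - 2) "M" ++ ["E"])[k]'(by rw [pv_bmes_pref_len n h2]; exact hk) =
      if k = 0 then "B" else if k = n - 1 then "E" else "M" := by
  rcases k with _ | j
  · simp
  · simp only [List.cons_append, List.nil_append, List.getElem_cons_succ]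
    by_cases hj : j < n - 2
    · rw [List.getElem_append_left (by simpa using hj)]
      simp [List.getElem_replicate]
      omega
    · rw [List.getElem_append_right (by simpa using hj)]
      have hj2 : j = n - 2 := by omega
      simp [hj2]
      omega

-- prefix sequence lookup for the BIO case (length ≥ 1)
lemma pv_bio_pref_get (n k : Nat) (hk : k < n) :
    (["B"] ++ List.replicate (n - 1) "I")[k]'(by simp; omega) =
      if k = 0 then "B" else "I" := by
  rcases k with _ | j
  · simp
  · simp only [List.cons_append, List.nil_append, List.getElem_cons_succ]
    rw [List.getElem_replicate]
    simp

-- ===== VERDICT (by name: the statement is the Claim_ definition above) =====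
theorem outputWithTagScheme_spec : Claim_equal_outputWithTagScheme := by
  intro input_list label tagScheme _
  unfold Spec_outputWithTagScheme outputWithTagScheme outputWithTagScheme_alt
  set n := input_list.length with hn
  simp only []
  by_cases hS : tagScheme == "BMES" <;> simp only [hS, if_pos, Bool.false_eq_true, if_false]
  · -- BMES
    by_cases h1 : (n : Int) == 1
    · have hn1 : n = 1 := by simpa using h1
      rcases input_list with _ | ⟨x, _ | ⟨y, t⟩⟩ <;> simp_all
      simp [String.append_assoc]
    · simp only [h1, if_false, Bool.false_eq_true]
      have hne1 : n ≠ 1 := by intro h; simp [h] at h1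
      rw [PySem.List.foldl_append_singleton_eq_map]
      have hnn : (((n : Int)) - 0).toNat = n := by omega
      rw [PySem.List.pyRange_one, hnn, List.nil_append]
      by_cases h0 : n = 0
      · simp [h0]
      · have h2 : 2 ≤ n := by omega
        rw [if_neg (show ¬ (n == 0) = true by simpa using h0),
            if_neg (show ¬ (n == 1) = true by simpa using hne1)]
        apply List.ext_getElem
        · simp; omega
        · intro k hk1 hk2
          have hk : k < n := by simpa using hk1
          rw [List.getElem_map, List.getElem_map, List.getElem_range, List.getElem_map, List.getElem_zip]
          rw [pv_bmes_pref_get n k h2 hk]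
          have hget : PySem.List.pyGetD input_list (0 + (k : Int)) "" = input_list[k] := by
            rw [zero_add, PySem.List.pyGetD_natCast]
            exact List.getD_eq_getElem _ _ hk
          by_cases hk0 : k = 0
          · simp [hk0, String.append_assoc] at *
            exact hget
          · have hz : ¬ (0 + (k : Int) == 0) := by simpa using fun h => hk0 (by exact_mod_cast h)
            by_cases hke : k = n - 1
            · have he : (0 + (k : Int) == (n : Int) - 1) := by
                simp; omega
              simp only [hz, if_false, he, if_true, Bool.false_eq_true, if_neg hk0, if_pos hke]
              rw [hget]; simp [String.append_assoc]
            · have he : ¬ (0 + (k : Int) == (n : Int) - 1) := by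
                simp; omega
              simp only [hz, he, if_false, Bool.false_eq_true, if_neg hk0, if_neg hke]
              rw [hget]; simp [String.append_assoc]
  · -- other scheme
    rw [PySem.List.foldl_append_singleton_eq_map]
    have hnn : (((n : Int)) - 0).toNat = n := by omega
    rw [PySem.List.pyRange_one, hnn, List.nil_append]
    by_cases h0 : n = 0
    · simp [h0]
    · rw [if_neg (show ¬ (n == 0) = true by simpa using h0)]
      apply List.ext_getElem
      · simp; omega
      · intro k hk1 hk2
        have hk : k < n := by simpa using hk1
        rw [List.getElem_map, List.getElem_map, List.getElem_range, List.getElem_map, List.getElem_zip]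
        rw [pv_bio_pref_get n k hk]
        have hget : PySem.List.pyGetD input_list (0 + (k : Int)) "" = input_list[k] := by
          rw [zero_add, PySem.List.pyGetD_natCast]
          exact List.getD_eq_getElem _ _ hk
        by_cases hk0 : k = 0
        · simp [hk0] at hget ⊢
          rw [hget]; simp [String.append_assoc]
        · have hz : ¬ (0 + (k : Int) == 0) := by simpa using fun h => hk0 (by exact_mod_cast h)
          simp only [hz, if_false, Bool.false_eq_true, if_neg hk0]
          rw [hget]; simp [String.append_assoc]
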